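-- pv_equiv track=rewrite | github.com/Severag/Advent_of_Code_2025 | Day 8/day_8.py | part1
-- ===== SOURCE A (Python) =====
-- def part1(distances):
--     num_connections = 10 if len(distances) < 1_000 else 1_000
--     circuits = []
--
--     for _, idx1, idx2 in distances[:num_connections]:
--         connection = {idx1, idx2}
--         others = []
--         for circ in circuits:
--             if not circ.isdisjoint(connection):
--                 connection |= circ
--             else:
--                 others.append(circ)
--
--         circuits = others + [connection, ]
--
--     circuits.sort(key=len, reverse=True)
--
--     total = 1
--     for circ in circuits[:3]:
--         total *= len(circ)
--
--     return total
-- ===== SOURCE B (Python) =====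
-- def part1(distances):
--     num_connections = 10 if len(distances) < 1_000 else 1_000
--
--     # flat node -> component-label map; merging an edge relabels the two
--     # touched components to a fresh label
--     label = {}
--     next_id = 0
--     for _, idx1, idx2 in distances[:num_connections]:
--         targets = {v for v in (label.get(idx1), label.get(idx2)) if v is not None}
--         label = {k: (next_id if v in targets else v) for k, v in label.items()}
--         label[idx1] = next_id
--         label[idx2] = next_id
--         next_id += 1
--
--     counts = {}
--     for v in label.values():
--         counts[v] = counts.get(v, 0) + 1
--
--     total = 1
--     for size in sorted(counts.values(), reverse=True)[:3]:
--         total *= size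
--     return total
-- ===== Notes on version B (the rewrite author's own statement) =====
-- stated objective: alternative
-- what changed: A maintains a list of node-sets and rescans/merges it for every edge; B instead keeps a flat node-to-label dict, relabelling the (at most two) touched components to a fresh id per edge, then counts label occurrences and multiplies the three largest counts.
import Mathlib
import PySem

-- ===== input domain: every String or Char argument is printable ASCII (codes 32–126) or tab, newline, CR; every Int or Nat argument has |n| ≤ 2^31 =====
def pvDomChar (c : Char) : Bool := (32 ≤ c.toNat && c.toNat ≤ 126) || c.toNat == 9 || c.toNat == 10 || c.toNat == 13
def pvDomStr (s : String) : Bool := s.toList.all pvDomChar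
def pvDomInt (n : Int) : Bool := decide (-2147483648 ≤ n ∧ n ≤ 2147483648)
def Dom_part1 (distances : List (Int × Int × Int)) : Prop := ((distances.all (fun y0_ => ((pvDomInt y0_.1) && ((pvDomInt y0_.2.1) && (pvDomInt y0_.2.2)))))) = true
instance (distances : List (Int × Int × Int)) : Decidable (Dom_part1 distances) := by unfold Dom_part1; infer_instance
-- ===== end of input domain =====

-- B replaces A's quadratic list-of-sets merging by a flat node→label dict with
-- fresh-label relabelling and a counting pass (objective: alternative data structure).

-- ===== PORT A =====
-- the body of A's outer loop: merge the circuits touching {idx1, idx2} into one set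
def stepA (circuits : List (PySem.Set Int)) (e : Int × Int × Int) : List (PySem.Set Int) :=
  let connection : PySem.Set Int := PySem.Set.ofList [e.2.1, e.2.2]
  let p := circuits.foldl
    (fun (st : PySem.Set Int × List (PySem.Set Int)) circ =>
      if !(PySem.Set.isdisjoint circ st.1) then (PySem.Set.union st.1 circ, st.2)
      else (st.1, st.2 ++ [circ]))
    (connection, ([] : List (PySem.Set Int)))
  p.2 ++ [p.1]

def part1 (distances : List (Int × Int × Int)) : Int :=
  let numConnections : Int := if distances.length < 1000 then 10 else 1000
  let circuits := (PySem.List.slice distances none (some numConnections)).foldl stepA []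
  let sortedCircuits := PySem.List.sorted circuits (fun c => PySem.Set.len c) true
  (PySem.List.slice sortedCircuits none (some 3)).foldl (fun total c => total * PySem.Set.len c) 1

-- ===== PORT B =====
-- the body of B's loop: relabel the (at most two) labels touched by the edge to a fresh id
def stepB (st : PySem.Dict Int Int × Int) (e : Int × Int × Int) : PySem.Dict Int Int × Int :=
  let targets : PySem.Set Int :=
    PySem.Set.ofList (([st.1.get? e.2.1, st.1.get? e.2.2]).filterMap id)
  let relabeled : PySem.Dict Int Int :=
    PySem.Dict.mk (st.1.items.map (fun p => (p.1, if targets.contains p.2 then st.2 else p.2)))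
  (((relabeled.insert e.2.1 st.2).insert e.2.2 st.2), st.2 + 1)

def part1_alt (distances : List (Int × Int × Int)) : Int :=
  let numConnections : Int := if distances.length < 1000 then 10 else 1000
  let st := (PySem.List.slice distances none (some numConnections)).foldl stepB (PySem.Dict.empty, 0)
  let counts := st.1.values.foldl (fun c v => c.insert v (c.getD v 0 + 1)) PySem.Dict.empty
  let sizes := PySem.List.sorted counts.values (fun s => s) true
  (PySem.List.slice sizes none (some 3)).foldl (fun total s => total * s) 1

-- ===== PRECONDITION & SPEC =====
def Spec_part1 (distances : List (Int × Int × Int)) (out : Int) : Prop := out = part1_alt distances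
instance (distances : List (Int × Int × Int)) (out : Int) : Decidable (Spec_part1 distances out) := by unfold Spec_part1; infer_instance

-- ===== CLAIM (what is proved, stated in full; the proofs are below) =====
def Claim_equal_part1 : Prop := ∀ (distances : List (Int × Int × Int)), Dom_part1 distances → Spec_part1 distances (part1 distances)

-- ===== LEMMAS AND PROOFS =====

-- the circuit c is exactly the set of nodes whose label is v
def PVRel (lbl : PySem.Dict Int Int) (c : PySem.Set Int) (v : Int) : Prop :=
  c.Nodup ∧ c ≠ [] ∧ ∀ x, x ∈ c ↔ lbl.get? x = some v

-- coupling invariant between A's circuit list and B's label dict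
def PVInv (circuits : List (PySem.Set Int)) (lbl : PySem.Dict Int Int) (nid : Int) : Prop :=
  lbl.keys.Nodup ∧ ∃ vals : List Int, vals.Nodup ∧ (∀ v ∈ vals, v < nid) ∧
    (∀ x v, lbl.get? x = some v → v ∈ vals) ∧ List.Forall₂ (PVRel lbl) circuits vals

-- small Forall₂ toolkit used by the coupling proof
theorem pv_forall₂_exists_right {α β : Type} {R : α → β → Prop} {l₁ : List α} {l₂ : List β}
    (h : List.Forall₂ R l₁ l₂) {b : β} (hb : b ∈ l₂) : ∃ a ∈ l₁, R a b := by
  induction h with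
  | nil => cases hb
  | cons hR _ ih =>
    rcases List.mem_cons.1 hb with rfl | hb'
    · exact ⟨_, List.mem_cons_self, hR⟩
    · rcases ih hb' with ⟨a, ha, hr⟩; exact ⟨a, List.mem_cons_of_mem _ ha, hr⟩

theorem pv_forall₂_exists_left {α β : Type} {R : α → β → Prop} {l₁ : List α} {l₂ : List β}
    (h : List.Forall₂ R l₁ l₂) {a : α} (ha : a ∈ l₁) : ∃ b ∈ l₂, R a b := by
  induction h with
  | nil => cases ha
  | cons hR _ ih =>
    rcases List.mem_cons.1 ha with rfl | ha'
    · exact ⟨_, List.mem_cons_self, hR⟩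
    · rcases ih ha' with ⟨b, hb, hr⟩; exact ⟨b, List.mem_cons_of_mem _ hb, hr⟩

theorem pv_forall₂_map_eq {α β γ : Type} {f : α → γ} {g : β → γ} {l₁ : List α} {l₂ : List β}
    (h : List.Forall₂ (fun a b => f a = g b) l₁ l₂) : l₁.map f = l₂.map g := by
  induction h with
  | nil => rfl
  | cons hR _ ih => simpa [hR] using ih

theorem pv_forall₂_filter {α β : Type} {R R' : α → β → Prop} {p : α → Bool} {q : β → Bool}
    {l₁ : List α} {l₂ : List β} (h : List.Forall₂ R l₁ l₂)
    (hpq : ∀ a b, R a b → p a = q b) (himp : ∀ a b, R a b → p a = true → R' a b) :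
    List.Forall₂ R' (l₁.filter p) (l₂.filter q) := by
  induction h with
  | nil => simp
  | @cons a b l₁' l₂' hR _ ih =>
    by_cases hp : p a = true
    · rw [List.filter_cons_of_pos hp, List.filter_cons_of_pos ((hpq a b hR) ▸ hp)]
      exact List.Forall₂.cons (himp a b hR hp) ih
    · rw [List.filter_cons_of_neg hp, List.filter_cons_of_neg ((hpq a b hR) ▸ hp)]
      exact ih

theorem pv_pairwise_disjoint {lbl : PySem.Dict Int Int} {cs : List (PySem.Set Int)} {vs : List Int}
    (h : List.Forall₂ (PVRel lbl) cs vs) (hnd : vs.Nodup) :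
    List.Pairwise (fun c d => ∀ x, x ∈ c → x ∉ d) cs := by
  induction h with
  | nil => exact List.Pairwise.nil
  | @cons c v cs' vs' hR hrest ih =>
    rcases List.nodup_cons.1 hnd with ⟨hv, hnd'⟩
    refine List.Pairwise.cons ?_ (ih hnd')
    intro d hd x hxc hxd
    rcases pv_forall₂_exists_left hrest hd with ⟨u, hu, hRu⟩
    have h1 := (hR.2.2 x).1 hxc
    have h2 := (hRu.2.2 x).1 hxd
    rw [h1] at h2
    obtain rfl : v = u := Option.some.inj h2
    exact hv hu

theorem pv_get?_mk_map_snd (d : PySem.Dict Int Int) (f : Int → Int) (x : Int) :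
    (PySem.Dict.mk (d.items.map (fun p => (p.1, f p.2)))).get? x = (d.get? x).map f := by
  obtain ⟨items⟩ := d
  induction items with
  | nil => simp [PySem.Dict.get?]
  | cons p rest ih =>
    obtain ⟨k, v⟩ := p
    simp only [List.map_cons, PySem.Dict.get?_mk_cons]
    by_cases h : k == x
    · simp [h]
    · simpa [h] using ih

theorem pv_keys_mk_map_snd (d : PySem.Dict Int Int) (f : Int → Int) :
    (PySem.Dict.mk (d.items.map (fun p => (p.1, f p.2)))).keys = d.keys := by
  simp only [PySem.Dict.keys, List.map_map]
  rfl

theorem pv_disj_congr (c conn b0 : PySem.Set Int)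
    (hsub : ∀ x ∈ b0, x ∈ conn) (hcap : ∀ x ∈ c, x ∈ conn → x ∈ b0) :
    PySem.Set.isdisjoint c conn = PySem.Set.isdisjoint c b0 := by
  by_cases h : PySem.Set.isdisjoint c b0 = true
  · rw [h]
    rw [PySem.Set.isdisjoint_iff] at h ⊢
    intro x hx hconn
    exact h x hx (hcap x hx hconn)
  · have h' : PySem.Set.isdisjoint c conn ≠ true := by
      intro hc
      apply h
      rw [PySem.Set.isdisjoint_iff] at hc ⊢
      intro x hx hb
      exact hc x hx (hsub x hb)
    simp only [Bool.not_eq_true] at h h'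
    rw [h, h']

theorem pv_inner (b0 : PySem.Set Int) (cs : List (PySem.Set Int)) (conn : PySem.Set Int)
    (os : List (PySem.Set Int))
    (hnd : conn.Nodup)
    (hpair : List.Pairwise (fun c d => ∀ x, x ∈ c → x ∉ d) cs)
    (hsub : ∀ x ∈ b0, x ∈ conn)
    (hcap : ∀ c ∈ cs, ∀ x ∈ c, x ∈ conn → x ∈ b0) :
    (cs.foldl (fun (st : PySem.Set Int × List (PySem.Set Int)) circ =>
        if !(PySem.Set.isdisjoint circ st.1) then (PySem.Set.union st.1 circ, st.2)
        else (st.1, st.2 ++ [circ])) (conn, os)).2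
      = os ++ cs.filter (fun c => PySem.Set.isdisjoint c b0) ∧
    (cs.foldl (fun (st : PySem.Set Int × List (PySem.Set Int)) circ =>
        if !(PySem.Set.isdisjoint circ st.1) then (PySem.Set.union st.1 circ, st.2)
        else (st.1, st.2 ++ [circ])) (conn, os)).1.Nodup ∧
    (∀ x, x ∈ (cs.foldl (fun (st : PySem.Set Int × List (PySem.Set Int)) circ =>
        if !(PySem.Set.isdisjoint circ st.1) then (PySem.Set.union st.1 circ, st.2)
        else (st.1, st.2 ++ [circ])) (conn, os)).1
      ↔ x ∈ conn ∨ ∃ c ∈ cs, PySem.Set.isdisjoint c b0 = false ∧ x ∈ c) := by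
  induction cs generalizing conn os with
  | nil => simp [hnd]
  | cons c cs' ih =>
    have hpair' := (List.pairwise_cons.1 hpair).2
    have hcdisj := (List.pairwise_cons.1 hpair).1
    have hc : PySem.Set.isdisjoint c conn = PySem.Set.isdisjoint c b0 :=
      pv_disj_congr c conn b0 hsub (hcap c List.mem_cons_self)
    by_cases hd : PySem.Set.isdisjoint c b0 = true
    · -- disjoint: appended to others
      simp only [List.foldl_cons, hc, hd, Bool.not_true, Bool.false_eq_true, if_false]
      have := ih conn (os ++ [c]) hnd hpair' hsub
        (fun d hdm x hx hcn => hcap d (List.mem_cons_of_mem _ hdm) x hx hcn)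
      refine ⟨?_, this.2.1, ?_⟩
      · rw [this.1]
        simp [hd]
      · intro x
        rw [this.2.2 x]
        constructor
        · rintro (hx | ⟨d, hdm, hdd, hxd⟩)
          · exact Or.inl hx
          · exact Or.inr ⟨d, List.mem_cons_of_mem _ hdm, hdd, hxd⟩
        · rintro (hx | ⟨d, hdm, hdd, hxd⟩)
          · exact Or.inl hx
          · rcases List.mem_cons.1 hdm with rfl | hdm'
            · rw [hd] at hdd; cases hdd
            · exact Or.inr ⟨d, hdm', hdd, hxd⟩
    · -- not disjoint: merged into conn
      have hd' : PySem.Set.isdisjoint c b0 = false := Bool.eq_false_iff.mpr hd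
      simp only [List.foldl_cons, hc, hd', Bool.not_false, reduceIte]
      have hnd' : (PySem.Set.union conn c).Nodup := PySem.Set.nodup_union conn c hnd
      have hsub' : ∀ x ∈ b0, x ∈ PySem.Set.union conn c := by
        intro x hx; exact (PySem.Set.mem_union conn c x).2 (Or.inl (hsub x hx))
      have hcap' : ∀ d ∈ cs', ∀ x ∈ d, x ∈ PySem.Set.union conn c → x ∈ b0 := by
        intro d hdm x hx hu
        rcases (PySem.Set.mem_union conn c x).1 hu with hcn | hcc
        · exact hcap d (List.mem_cons_of_mem _ hdm) x hx hcn
        · exact absurd hx (hcdisj d hdm x hcc |> fun h => h)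
      have := ih (PySem.Set.union conn c) os hnd' hpair' hsub' hcap'
      refine ⟨?_, this.2.1, ?_⟩
      · rw [this.1, List.filter_cons_of_neg (by simp [hd'])]
      · intro x
        rw [this.2.2 x, PySem.Set.mem_union]
        constructor
        · rintro ((hx | hx) | ⟨d, hdm, hdd, hxd⟩)
          · exact Or.inl hx
          · exact Or.inr ⟨c, List.mem_cons_self, hd', hx⟩
          · exact Or.inr ⟨d, List.mem_cons_of_mem _ hdm, hdd, hxd⟩
        · rintro (hx | ⟨d, hdm, hdd, hxd⟩)
          · exact Or.inl (Or.inl hx)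
          · rcases List.mem_cons.1 hdm with rfl | hdm'
            · exact Or.inl (Or.inr hxd)
            · exact Or.inr ⟨d, hdm', hdd, hxd⟩

theorem pv_forall₂_mem_right {α β : Type} {R : α → β → Prop} {l₁ : List α} {l₂ : List β}
    (h : List.Forall₂ R l₁ l₂) : List.Forall₂ (fun a b => R a b ∧ b ∈ l₂) l₁ l₂ := by
  induction h with
  | nil => exact List.Forall₂.nil
  | cons hR hrest ih =>
    exact List.Forall₂.cons ⟨hR, List.mem_cons_self⟩
      (ih.imp (fun _ _ hab => ⟨hab.1, List.mem_cons_of_mem _ hab.2⟩))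

theorem pv_forall₂_append {α β : Type} {R : α → β → Prop} {l₁ u₁ : List α} {l₂ u₂ : List β}
    (h : List.Forall₂ R l₁ l₂) (h' : List.Forall₂ R u₁ u₂) :
    List.Forall₂ R (l₁ ++ u₁) (l₂ ++ u₂) := by
  induction h with
  | nil => simpa using h'
  | cons hR _ ih => exact List.Forall₂.cons hR ih

theorem pv_step {circuits : List (PySem.Set Int)} {lbl : PySem.Dict Int Int} {nid : Int}
    (h : PVInv circuits lbl nid) (e : Int × Int × Int) :
    PVInv (stepA circuits e) (stepB (lbl, nid) e).1 (stepB (lbl, nid) e).2 := by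
  obtain ⟨hkeys, vals, hvnd, hvlt, hcover, hrel⟩ := h
  set a := e.2.1 with ha
  set b := e.2.2 with hb
  set base : PySem.Set Int := PySem.Set.ofList [a, b] with hbase
  set targets : PySem.Set Int :=
    PySem.Set.ofList (([lbl.get? a, lbl.get? b]).filterMap id) with htg
  set f : Int → Int := fun v => if targets.contains v then nid else v with hf
  set lbl' : PySem.Dict Int Int :=
    (((PySem.Dict.mk (lbl.items.map (fun p => (p.1, if targets.contains p.2 then nid else p.2)))).insert
      a nid).insert b nid) with hlbl'
  have hstepB : stepB (lbl, nid) e = (lbl', nid + 1) := rfl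
  -- targets membership
  have htmem : ∀ v, targets.contains v = true ↔ (lbl.get? a = some v ∨ lbl.get? b = some v) := by
    intro v
    rw [htg, PySem.Set.contains_iff, PySem.Set.mem_ofList]
    simp [eq_comm]
  -- base membership
  have hbmem : ∀ x, x ∈ base ↔ (x = a ∨ x = b) := by
    intro x; rw [hbase, PySem.Set.mem_ofList]; simp
  -- lookup in the new dict
  have hget' : ∀ x, lbl'.get? x =
      if x = b then some nid else if x = a then some nid else (lbl.get? x).map f := by
    intro x
    rw [hlbl', PySem.Dict.get?_insert, PySem.Dict.get?_insert]
    rcases eq_or_ne x b with rfl | hxb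
    · simp
    · rw [if_neg hxb, if_neg hxb]
      rcases eq_or_ne x a with rfl | hxa
      · simp
      · rw [if_neg hxa, if_neg hxa, pv_get?_mk_map_snd lbl f x]
  -- new keys are nodup
  have hkeys' : lbl'.keys.Nodup := by
    rw [hlbl']
    exact PySem.Dict.nodup_keys_insert _ _ _ (PySem.Dict.nodup_keys_insert _ _ _
      ((pv_keys_mk_map_snd lbl f) ▸ hkeys))
  -- touching base ↔ label in targets, for related pairs
  have htouch : ∀ c v, PVRel lbl c v → (PySem.Set.isdisjoint c base = (!targets.contains v)) := by
    intro c v hR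
    by_cases ht : targets.contains v = true
    · rcases (htmem v).1 ht with hv | hv
      · have hac : a ∈ c := (hR.2.2 a).2 hv
        have : PySem.Set.isdisjoint c base = false := by
          rw [Bool.eq_false_iff]
          intro hdisj
          exact (PySem.Set.isdisjoint_iff c base).1 hdisj a hac ((hbmem a).2 (Or.inl rfl))
        rw [this, ht]; rfl
      · have hbc : b ∈ c := (hR.2.2 b).2 hv
        have : PySem.Set.isdisjoint c base = false := by
          rw [Bool.eq_false_iff]
          intro hdisj
          exact (PySem.Set.isdisjoint_iff c base).1 hdisj b hbc ((hbmem b).2 (Or.inr rfl))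
        rw [this, ht]; rfl
    · have ht' : targets.contains v = false := Bool.eq_false_iff.mpr ht
      have : PySem.Set.isdisjoint c base = true := by
        rw [PySem.Set.isdisjoint_iff]
        intro x hx hxb
        rcases (hbmem x).1 hxb with rfl | rfl
        · exact ht ((htmem v).2 (Or.inl ((hR.2.2 _).1 hx)))
        · exact ht ((htmem v).2 (Or.inr ((hR.2.2 _).1 hx)))
      rw [this, ht']; rfl
  -- characterize the inner fold via pv_inner
  have hinner := pv_inner base circuits base []
    (by rw [hbase]; exact PySem.Set.nodup_ofList _)
    (pv_pairwise_disjoint hrel hvnd)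
    (fun x hx => hx) (fun c _ x _ hx => hx)
  have hstepA : stepA circuits e =
      circuits.filter (fun c => PySem.Set.isdisjoint c base) ++
        [(circuits.foldl (fun (st : PySem.Set Int × List (PySem.Set Int)) circ =>
            if !(PySem.Set.isdisjoint circ st.1) then (PySem.Set.union st.1 circ, st.2)
            else (st.1, st.2 ++ [circ])) (base, [])).1] := by
    rw [stepA]
    rw [hinner.1]
    rfl
  set conn' := (circuits.foldl (fun (st : PySem.Set Int × List (PySem.Set Int)) circ =>
      if !(PySem.Set.isdisjoint circ st.1) then (PySem.Set.union st.1 circ, st.2)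
      else (st.1, st.2 ++ [circ])) (base, [])).1 with hconn'
  have hconnmem : ∀ x, x ∈ conn' ↔ x ∈ base ∨
      ∃ c ∈ circuits, PySem.Set.isdisjoint c base = false ∧ x ∈ c := hinner.2.2
  -- new value list
  set vals' : List Int := vals.filter (fun v => !targets.contains v) ++ [nid] with hvals'
  show PVInv (stepA circuits e) lbl' (nid + 1)
  refine ⟨hkeys', vals', ?_, ?_, ?_, ?_⟩
  · -- nodup
    rw [List.nodup_append]
    refine ⟨hvnd.filter _, List.nodup_singleton _, ?_⟩
    intro v hv w hw
    rcases List.mem_singleton.1 hw with rfl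
    exact ne_of_lt (hvlt v (List.mem_of_mem_filter hv))
  · -- bounds
    intro v hv
    rcases List.mem_append.1 hv with hv | hv
    · exact lt_trans (hvlt v (List.mem_of_mem_filter hv)) (by omega)
    · rcases List.mem_singleton.1 hv with rfl; omega
  · -- cover
    intro x v hx
    rw [hget'] at hx
    split_ifs at hx with h1 h2
    · rcases Option.some.inj hx with rfl; exact List.mem_append_right _ (List.mem_singleton.2 rfl)
    · rcases Option.some.inj hx with rfl; exact List.mem_append_right _ (List.mem_singleton.2 rfl)
    · rcases Option.map_eq_some_iff.1 hx with ⟨u, hu, hfu⟩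
      by_cases ht : targets.contains u = true
      · have htm : u ∈ targets := (PySem.Set.contains_iff _ _).1 ht
        have hvn : v = nid := by rw [← hfu]; simp [hf, htm]
        rw [hvn]
        exact List.mem_append_right _ (List.mem_singleton.2 rfl)
      · have ht' : targets.contains u = false := Bool.eq_false_iff.mpr ht
        have htm : u ∉ targets := fun hm => ht ((PySem.Set.contains_iff _ _).2 hm)
        have hvu : v = u := by rw [← hfu]; simp [hf, htm]
        rw [hvu]
        refine List.mem_append_left _ (List.mem_filter.2 ⟨hcover x u hu, ?_⟩)
        simpa using htm
  · -- Forall₂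
    rw [hstepA, hvals']
    refine pv_forall₂_append ?_ (List.Forall₂.cons ?_ List.Forall₂.nil)
    · -- kept circuits
      refine pv_forall₂_filter (pv_forall₂_mem_right hrel) ?_ ?_
      · intro c v hR; exact htouch c v hR.1
      · intro c v hR hdisj
        obtain ⟨⟨hcnd, hcne, hmem⟩, hvv⟩ := hR
        have hvt : targets.contains v = false := by
          have := htouch c v ⟨hcnd, hcne, hmem⟩
          rw [hdisj] at this
          cases hh : targets.contains v
          · rfl
          · rw [hh] at this; cases this
        refine ⟨hcnd, hcne, ?_⟩
        intro x
        rw [hmem x, hget']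
        have hvn : v ≠ nid := ne_of_lt (hvlt v hvv)
        rcases eq_or_ne x b with rfl | hxb
        · rw [if_pos rfl]
          constructor
          · intro hx
            exact absurd ((htmem v).2 (Or.inr hx)) (fun h => by rw [h] at hvt; cases hvt)
          · intro hx; exact absurd (Option.some.inj hx).symm hvn
        · rw [if_neg hxb]
          rcases eq_or_ne x a with rfl | hxa
          · rw [if_pos rfl]
            constructor
            · intro hx
              exact absurd ((htmem v).2 (Or.inl hx)) (fun h => by rw [h] at hvt; cases hvt)
            · intro hx; exact absurd (Option.some.inj hx).symm hvn
          · rw [if_neg hxa]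
            constructor
            · intro hx
              rw [hx]
              have hvtm : v ∉ targets := fun hm => by
                rw [(show targets.contains v = true from (PySem.Set.contains_iff _ _).2 hm)] at hvt
                cases hvt
              simp [hf, hvtm]
            · intro hx
              rcases Option.map_eq_some_iff.1 hx with ⟨u, hu, hfu⟩
              by_cases ht : targets.contains u = true
              · have htm : u ∈ targets := (PySem.Set.contains_iff _ _).1 ht
                have : v = nid := by rw [← hfu]; simp [hf, htm]
                exact absurd this hvn
              · have htm : u ∉ targets := fun hm => ht ((PySem.Set.contains_iff _ _).2 hm)
                have hvu : v = u := by rw [← hfu]; simp [hf, htm]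
                rw [hvu]; exact hu
    · -- the merged circuit carries the fresh label
      refine ⟨hinner.2.1, ?_, ?_⟩
      · intro hnil
        have : a ∈ conn' := (hconnmem a).2 (Or.inl ((hbmem a).2 (Or.inl rfl)))
        rw [hnil] at this; cases this
      · intro x
        rw [hconnmem x, hget']
        constructor
        · rintro (hx | ⟨c, hc, hdisj, hxc⟩)
          · have hx' := (hbmem x).1 hx
            rcases eq_or_ne x b with rfl | hxb
            · rw [if_pos rfl]
            · rw [if_neg hxb]
              have hxa : x = a := by
                rcases hx' with h | h
                · exact h
                · exact absurd h hxb
              rw [if_pos hxa]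
          · rcases pv_forall₂_exists_left hrel hc with ⟨v, hvv, hR⟩
            have hvt : targets.contains v = true := by
              have := htouch c v hR
              rw [hdisj] at this
              cases hh : targets.contains v
              · rw [hh] at this; cases this
              · rfl
            have hgx : lbl.get? x = some v := (hR.2.2 x).1 hxc
            rcases eq_or_ne x b with rfl | hxb
            · rw [if_pos rfl]
            · rw [if_neg hxb]
              rcases eq_or_ne x a with rfl | hxa
              · rw [if_pos rfl]
              · rw [if_neg hxa, hgx]
                have hvtm : v ∈ targets := (PySem.Set.contains_iff _ _).1 hvt
                simp [hf, hvtm]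
        · intro hx
          split_ifs at hx with h1 h2
          · exact Or.inl ((hbmem x).2 (Or.inr h1))
          · exact Or.inl ((hbmem x).2 (Or.inl h2))
          · rcases Option.map_eq_some_iff.1 hx with ⟨u, hu, hfu⟩
            by_cases ht : targets.contains u = true
            · rcases pv_forall₂_exists_right hrel (hcover x u hu) with ⟨c, hc, hR⟩
              have hdisj : PySem.Set.isdisjoint c base = false := by
                have := htouch c u hR
                rw [ht] at this
                simpa using this
              exact Or.inr ⟨c, hc, hdisj, (hR.2.2 x).2 hu⟩
            · have htm : u ∉ targets := fun hm => ht ((PySem.Set.contains_iff _ _).2 hm)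
              have hun : u = nid := by rw [← hfu]; simp [hf, htm]
              have hult := hvlt u (hcover x u hu)
              rw [hun] at hult
              exact absurd hult (lt_irrefl _)

theorem pv_len_eq_count {lbl : PySem.Dict Int Int} (hkeys : lbl.keys.Nodup)
    {c : PySem.Set Int} {v : Int} (hR : PVRel lbl c v) :
    PySem.Set.len c = ((lbl.values.count v : Nat) : Int) := by
  obtain ⟨hcnd, -, hmem⟩ := hR
  have hperm : c.Perm ((lbl.items.filter (fun p => p.2 == v)).map (·.1)) := by
    rw [List.perm_ext_iff_of_nodup hcnd ?_]
    · intro x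
      rw [hmem x, List.mem_map]
      constructor
      · intro hx
        refine ⟨(x, v), List.mem_filter.2 ⟨?_, by simp⟩, rfl⟩
        exact (PySem.Dict.get?_eq_some_iff_mem_items lbl x v hkeys).1 hx
      · rintro ⟨p, hp, rfl⟩
        rcases List.mem_filter.1 hp with ⟨hpi, hpv⟩
        have : p = (p.1, v) := by
          have := beq_iff_eq.1 hpv
          cases p; simp_all
        rw [this] at hpi
        exact (PySem.Dict.get?_eq_some_iff_mem_items lbl p.1 v hkeys).2 hpi
    · refine List.Nodup.sublist ?_ hkeys
      have hsub : (lbl.items.filter (fun p => p.2 == v)).Sublist lbl.items := List.filter_sublist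
      simpa [PySem.Dict.keys] using hsub.map (·.1)
  have hlen : c.length = (lbl.items.filter (fun p => p.2 == v)).length := by
    simpa using hperm.length_eq
  have hcount : lbl.values.count v = (lbl.items.filter (fun p => p.2 == v)).length := by
    rw [List.count, PySem.Dict.values, List.countP_map, List.countP_eq_length_filter]
    rfl
  simp [PySem.Set.len, hlen, hcount]


theorem pv_fold (edges : List (Int × Int × Int)) :
    ∀ (circuits : List (PySem.Set Int)) (lbl : PySem.Dict Int Int) (nid : Int),
    PVInv circuits lbl nid →
    PVInv (edges.foldl stepA circuits) (edges.foldl stepB (lbl, nid)).1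
      (edges.foldl stepB (lbl, nid)).2 := by
  induction edges with
  | nil => intro c l n h; exact h
  | cons e es ih =>
    intro c l n h
    simpa using ih _ _ _ (pv_step h e)

theorem pv_finish {circuits : List (PySem.Set Int)} {lbl : PySem.Dict Int Int} {nid : Int}
    (h : PVInv circuits lbl nid) :
    (PySem.List.slice (PySem.List.sorted circuits (fun c => PySem.Set.len c) true)
        none (some 3)).foldl (fun total c => total * PySem.Set.len c) 1
    = (PySem.List.slice (PySem.List.sorted
          (lbl.values.foldl (fun c v => c.insert v (c.getD v 0 + 1)) PySem.Dict.empty).values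
          (fun s => s) true) none (some 3)).foldl (fun total s => total * s) 1 := by
  obtain ⟨hkeys, vals, hvnd, hvlt, hcover, hrel⟩ := h
  set g : Int → Int := fun v => ((lbl.values.count v : Nat) : Int) with hg
  -- the counting dict is Counter(values)
  rw [PySem.Dict.foldl_insert_getD_add_one_eq_counter]
  have hcv : (PySem.Dict.counter lbl.values).values = (PySem.Set.ofList lbl.values).map g := by
    rw [PySem.Dict.values, PySem.Dict.items_counter, List.map_map]
    rfl
  -- pointwise: circuit sizes are label fiber sizes
  have hmapeq : circuits.map (fun c => PySem.Set.len c) = vals.map g :=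
    pv_forall₂_map_eq (hrel.imp (fun _ _ hR => pv_len_eq_count hkeys hR))
  -- the distinct labels are exactly vals (as a multiset)
  have hvperm : vals.Perm (PySem.Set.ofList lbl.values) := by
    rw [List.perm_ext_iff_of_nodup hvnd (PySem.Set.nodup_ofList _)]
    intro v
    rw [PySem.Set.mem_ofList]
    constructor
    · intro hv
      rcases pv_forall₂_exists_right hrel hv with ⟨c, _, hR⟩
      rcases List.exists_mem_of_ne_nil c hR.2.1 with ⟨x, hx⟩
      have := (hR.2.2 x).1 hx
      have hmem2 := PySem.Dict.mem_items_of_get?_eq_some _ this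
      rw [PySem.Dict.values]
      exact List.mem_map.2 ⟨(x, v), hmem2, rfl⟩
    · intro hv
      rw [PySem.Dict.values] at hv
      rcases List.mem_map.1 hv with ⟨p, hp, rfl⟩
      have hp' : (p.1, p.2) ∈ lbl.items := by simpa using hp
      exact hcover p.1 p.2 (PySem.Dict.get?_of_mem_items _ hp' hkeys)
  -- the two size lists are permutations of each other
  have hperm : (circuits.map (fun c => PySem.Set.len c)).Perm
      ((PySem.Dict.counter lbl.values).values) := by
    rw [hmapeq, hcv]
    exact hvperm.map g
  -- the sorted (descending) circuit sizes equal the sorted count values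
  have hsorted : (PySem.List.sorted circuits (fun c => PySem.Set.len c) true).map
        (fun c => PySem.Set.len c)
      = PySem.List.sorted ((PySem.Dict.counter lbl.values).values) (fun s => s) true := by
    refine PySem.List.eq_of_perm_of_pairwise_le_of_injective (fun x : Int => -x)
      neg_injective ?_ ?_ ?_
    · exact ((PySem.List.sorted_perm circuits _ true).map _).trans
        (hperm.trans (PySem.List.sorted_perm _ _ true).symm)
    · exact List.pairwise_map.2 ((PySem.List.sorted_pairwise_rev circuits
        (fun c => PySem.Set.len c)).imp (fun hab => by dsimp only; omega))
    · exact (PySem.List.sorted_pairwise_rev _ (fun s : Int => s)).imp (fun hab => by dsimp only; omega)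
  -- finish: both products run over the first three of the same list
  rw [PySem.List.slice_to _ (by norm_num), PySem.List.slice_to _ (by norm_num)]
  rw [← hsorted]
  rw [← List.map_take, List.foldl_map]

-- ===== VERDICT (by name: the statement is the Claim_ definition above) =====
theorem part1_spec : Claim_equal_part1 := by
  intro distances _
  unfold Spec_part1 part1 part1_alt
  have hbase : PVInv [] PySem.Dict.empty 0 := by
    refine ⟨PySem.Dict.nodup_keys_empty, [], List.nodup_nil, by simp, ?_, List.Forall₂.nil⟩
    intro x v hx
    simp [PySem.Dict.get?_empty] at hx
  exact pv_finish (pv_fold _ _ _ _ hbase)
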